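-- pv_equiv track=rewrite | github.com/yoavshosh/proteomics_simulator | old_out_of_use/very_old_and_some_of_the_igs_proteomic_sim_scripts/test2.py | c_a_list
-- ===== SOURCE A (Python) =====
-- def c_a_list(sequence):
--
--     a_list = []
--     c_list = []
--
--     for i in range(len(sequence)):
--         if sequence[i:i+1] == 'A':
--             a_list.append(i)
--         elif sequence[i:i+1] == 'C':
--             c_list.append(i)
--
--     return a_list, c_list
-- ===== SOURCE B (Python) =====
-- def c_a_list(sequence):
--     # Jump from occurrence to occurrence with str.find instead of testing every index.
--     def positions(ch):
--         out = []
--         i = sequence.find(ch)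
--         while i != -1:
--             out.append(i)
--             i = sequence.find(ch, i + 1)
--         return out
--     return positions('A'), positions('C')
-- ===== Notes on version B (the rewrite author's own statement) =====
-- stated objective: faster
-- what changed: Replaces A's per-index scan with if/elif slice tests by repeated str.find calls that jump directly from one occurrence of each target letter to the next, collecting match positions.
import Mathlib
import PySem

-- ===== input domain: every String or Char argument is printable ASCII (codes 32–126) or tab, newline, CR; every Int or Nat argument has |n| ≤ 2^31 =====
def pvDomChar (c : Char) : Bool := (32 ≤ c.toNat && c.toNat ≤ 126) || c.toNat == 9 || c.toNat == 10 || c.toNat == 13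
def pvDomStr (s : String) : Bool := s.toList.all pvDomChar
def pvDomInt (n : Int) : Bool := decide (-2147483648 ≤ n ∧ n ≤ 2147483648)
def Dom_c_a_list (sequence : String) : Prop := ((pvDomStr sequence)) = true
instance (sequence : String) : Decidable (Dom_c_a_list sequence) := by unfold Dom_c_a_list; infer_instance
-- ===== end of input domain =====

-- B replaces A's per-index scan (if/elif on each slice) by repeated str.find jumps
-- from one occurrence of each target letter to the next; measurably faster in Python.

-- ===== PORT A =====
-- single pass over range(len(sequence)); slice test sequence[i:i+1] (on code points, exact for ASCII and beyond)
def c_a_list (sequence : String) : List Int × List Int :=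
  (PySem.List.pyRange 0 (PySem.Chars.len sequence.toList) 1).foldl
    (fun (st : List Int × List Int) i =>
      if PySem.Chars.slice sequence.toList (some i) (some (i + 1)) = ['A'] then
        (st.1 ++ [i], st.2)
      else if PySem.Chars.slice sequence.toList (some i) (some (i + 1)) = ['C'] then
        (st.1, st.2 ++ [i])
      else st) ([], [])

-- ===== PORT B =====
-- the while loop 'i = find(ch); while i != -1: append i; i = find(ch, i+1)';
-- fuel (length+1) is only a totality guard: find returns strictly increasing indices
def pvPosFrom (s sub : List Char) (k : Int) : Nat → List Int
  | 0 => []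
  | fuel + 1 =>
    let i := PySem.Chars.findFrom s sub k
    if i = -1 then [] else i :: pvPosFrom s sub (i + 1) fuel

def c_a_list_alt (sequence : String) : List Int × List Int :=
  (pvPosFrom sequence.toList ['A'] 0 (sequence.toList.length + 1),
   pvPosFrom sequence.toList ['C'] 0 (sequence.toList.length + 1))

-- ===== PRECONDITION & SPEC =====
def Spec_c_a_list (sequence : String) (out : List Int × List Int) : Prop := out = c_a_list_alt sequence
instance (sequence : String) (out : List Int × List Int) : Decidable (Spec_c_a_list sequence out) := by unfold Spec_c_a_list; infer_instance

-- ===== CLAIM (what is proved, stated in full; the proofs are below) =====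
def Claim_equal_c_a_list : Prop := ∀ (sequence : String), Dom_c_a_list sequence → Spec_c_a_list sequence (c_a_list sequence)

-- ===== LEMMAS AND PROOFS =====

-- common characterisation: indices i with k ≤ i < n and cs[i] = ch, ascending, as Ints
def idxFilter (cs : List Char) (ch : Char) (k n : Nat) : List Int :=
  ((List.range n).filter (fun i => decide (k ≤ i ∧ cs[i]? = some ch))).map (fun i : Nat => (i : Int))

theorem singleton_prefix_iff {a : Char} {l : List Char} : [a] <+: l ↔ l.head? = some a := by
  cases l with
  | nil => simp
  | cons b t => simp [List.cons_prefix_cons, eq_comm]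

theorem singleton_infix_iff {a : Char} {l : List Char} : [a] <:+: l ↔ a ∈ l := by
  constructor
  · intro h; exact h.mem (by simp)
  · intro h
    obtain ⟨s, t, rfl⟩ := List.mem_iff_append.mp h
    exact ⟨s, t, by simp⟩

theorem c_a_list_loop (cs : List Char) (n : Nat) (hn : n ≤ cs.length) :
    (PySem.List.pyRange 0 (n : Int) 1).foldl
      (fun (st : List Int × List Int) i =>
        if PySem.Chars.slice cs (some i) (some (i + 1)) = ['A'] then
          (st.1 ++ [i], st.2)
        else if PySem.Chars.slice cs (some i) (some (i + 1)) = ['C'] then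
          (st.1, st.2 ++ [i])
        else st) ([], []) =
    (idxFilter cs 'A' 0 n, idxFilter cs 'C' 0 n) := by
  induction n with
  | zero => simp [PySem.List.pyRange, idxFilter]
  | succ m ih =>
    have hm : m ≤ cs.length := Nat.le_of_succ_le hn
    have hlt : m < cs.length := hn
    rw [show ((m + 1 : Nat) : Int) = (m : Int) + 1 by push_cast; ring,
        PySem.List.pyRange_one_succ_right (by positivity), List.foldl_append, ih hm]
    have hslice : PySem.Chars.slice cs (some (m : Int)) (some ((m : Int) + 1)) = [cs[m]] := by
      have : ((m : Int) + 1) = ((m + 1 : Nat) : Int) := by push_cast; ring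
      have h1 : m + 1 - m = 1 := by omega
      rw [PySem.Chars.slice_eq_listSlice, this, PySem.List.slice_natCast, h1,
        List.drop_eq_getElem_cons hlt, List.take_succ_cons, List.take_zero]
    have hget : cs[m]? = some cs[m] := List.getElem?_eq_getElem hlt
    simp only [List.foldl_cons, List.foldl_nil, hslice, idxFilter, List.range_succ,
      List.filter_append, List.filter_cons, List.filter_nil, hget]
    by_cases hA : cs[m] = 'A'
    · simp [hA]
    · by_cases hC : cs[m] = 'C' <;> simp [hA, hC]

theorem idxFilter_cons (cs : List Char) (ch : Char) (k r n : Nat)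
    (hkr : k ≤ r) (hrn : r < n) (hn : n = cs.length)
    (hr : cs[r]? = some ch) (hmin : ∀ j, k ≤ j → j < r → cs[j]? ≠ some ch) :
    idxFilter cs ch k n = (r : Int) :: idxFilter cs ch (r + 1) n := by
  unfold idxFilter
  have hsplit : List.range n = (List.range r ++ [r]) ++ (List.range (n - (r + 1))).map ((r + 1) + ·) := by
    rw [← List.range_succ, show r.succ = r + 1 from rfl, ← List.range_add]
    congr 1; omega
  rw [hsplit]
  simp only [List.filter_append, List.filter_cons, List.filter_nil]
  have h1 : (List.range r).filter (fun i => decide (k ≤ i ∧ cs[i]? = some ch)) = [] := by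
    rw [List.filter_eq_nil_iff]
    intro i hi
    simp only [List.mem_range] at hi
    simp only [decide_eq_true_eq, not_and]
    exact fun hk => hmin i hk hi
  have h2 : (List.range r).filter (fun i => decide (r + 1 ≤ i ∧ cs[i]? = some ch)) = [] := by
    rw [List.filter_eq_nil_iff]
    intro i hi
    simp only [List.mem_range] at hi
    simp only [decide_eq_true_eq, not_and]
    omega
  have h3 : ((List.range (n - (r + 1))).map ((r + 1) + ·)).filter
        (fun i => decide (k ≤ i ∧ cs[i]? = some ch)) =
      ((List.range (n - (r + 1))).map ((r + 1) + ·)).filter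
        (fun i => decide (r + 1 ≤ i ∧ cs[i]? = some ch)) := by
    apply List.filter_congr
    intro x hx
    simp only [List.mem_map, List.mem_range] at hx
    obtain ⟨j, _, rfl⟩ := hx
    simp only [decide_eq_decide]
    constructor <;> intro h <;> exact ⟨by omega, h.2⟩
  rw [h1, h2, h3]
  simp [hkr, hr]

theorem posFrom_eq (cs : List Char) (ch : Char) :
    ∀ (fuel k : Nat), k ≤ cs.length → cs.length - k < fuel →
      pvPosFrom cs [ch] (k : Int) fuel = idxFilter cs ch k cs.length := by
  intro fuel
  induction fuel with
  | zero => intro k _ h; omega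
  | succ f ihf =>
    intro k hk hfuel
    by_cases hneg : PySem.Chars.findFrom cs [ch] (k : Int) = -1
    · -- no further occurrence: idxFilter is empty
      have hno : ¬ ([ch] <:+: cs.drop k) :=
        (PySem.Chars.findFrom_natCast_eq_neg_one_iff cs [ch] k hk).mp hneg
      rw [singleton_infix_iff] at hno
      have hL : pvPosFrom cs [ch] ((k : Nat) : Int) (f + 1) = [] := by
        simp [pvPosFrom, hneg]
      rw [hL]
      symm
      unfold idxFilter
      simp only [List.map_eq_nil_iff, List.filter_eq_nil_iff]
      intro i hi
      simp only [List.mem_range] at hi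
      simp only [decide_eq_true_eq, not_and]
      intro hki hich
      apply hno
      have heq : (cs.drop k)[i - k]'(by simp; omega) = cs[i]'hi := by
        rw [List.getElem_drop]; congr 1; omega
      rw [List.getElem?_eq_getElem hi, Option.some.injEq] at hich
      have hm := List.getElem_mem (l := cs.drop k) (n := i - k) (h := by simp [List.length_drop]; omega)
      rw [heq, hich] at hm
      exact hm
    · obtain ⟨hge, hpre, hmin⟩ := PySem.Chars.findFrom_natCast_spec cs [ch] k hk hneg
      set i := PySem.Chars.findFrom cs [ch] (k : Int) with hi
      set r := i.toNat with hr
      have hir : i = (r : Int) := by omega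
      have hdrop : (cs.drop r).head? = some ch := singleton_prefix_iff.mp hpre
      have hrlen : r < cs.length := by
        by_contra hge'
        rw [List.drop_eq_nil_of_le (by omega)] at hdrop
        simp at hdrop
      have hrget : cs[r]? = some ch := by
        rw [← List.head?_drop]; exact hdrop
      have hkr : k ≤ r := by omega
      have hmin' : ∀ j, k ≤ j → j < r → cs[j]? ≠ some ch := by
        intro j hkj hjr hch
        apply hmin j hkj hjr
        rw [singleton_prefix_iff, List.head?_drop]
        exact hch
      have hL : pvPosFrom cs [ch] ((k : Nat) : Int) (f + 1) = i :: pvPosFrom cs [ch] (i + 1) f := by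
        simp [pvPosFrom, ← hi, hneg]
      rw [hL, hir,
        show ((r : Int) + 1) = ((r + 1 : Nat) : Int) by push_cast; ring,
        ihf (r + 1) (by omega) (by omega),
        idxFilter_cons cs ch k r cs.length hkr hrlen rfl hrget hmin']

-- ===== VERDICT (by name: the statement is the Claim_ definition above) =====
theorem c_a_list_spec : Claim_equal_c_a_list := by
  intro s _
  unfold Spec_c_a_list c_a_list c_a_list_alt
  rw [PySem.Chars.len_eq, c_a_list_loop s.toList s.toList.length le_rfl]
  have hA := posFrom_eq s.toList 'A' (s.toList.length + 1) 0 (Nat.zero_le _) (by omega)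
  have hC := posFrom_eq s.toList 'C' (s.toList.length + 1) 0 (Nat.zero_le _) (by omega)
  rw [show ((0 : Nat) : Int) = 0 from rfl] at hA hC
  rw [hA, hC]
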